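-- pv_equiv track=rewrite | github.com/ProjetPP/PPP-QuestionParsing-Grammatical | ppp_nlp_classical/preprocessingMerge.py | findQuotations
-- ===== SOURCE A (Python) =====
-- def findQuotations(r):
--     """
--         Return a list of elements of the form (begin,end,set of integers).
--         Each set is a set of words index belonging to a same quotation.
--         Begin and end are the index of the quotations marks
--     """
--     index=0
--     (inQuote,quotationList,quotationSet)=(False,[],set())
--     for word in r['words']:
--         index+=1
--         if word[0] == "``":
--             assert not inQuote
--             (inQuote,begin) = (True,index)
--             continue
--         if word[0] == "''":
--             assert inQuote
--             quotationList+=[(begin,index,quotationSet)]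
--             (inQuote,quotationSet)=(False,set())
--             continue
--         if inQuote:
--             quotationSet.add(index)
--     assert not inQuote
--     return quotationList
-- ===== SOURCE B (Python) =====
-- def findQuotations(r):
--     """
--         Return a list of elements of the form (begin,end,set of integers).
--         Each set is a set of words index belonging to a same quotation.
--         Begin and end are the index of the quotations marks
--     """
--     # Phase 1: collect quote-mark events in order.
--     marks = []
--     index = 0
--     for word in r['words']:
--         index += 1
--         w0 = word[0]
--         if w0 == "``":
--             marks.append((True, index))
--         elif w0 == "''":
--             marks.append((False, index))
--     # Phase 2: pair consecutive marks (open, close).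
--     result = []
--     i = 0
--     while i < len(marks):
--         kind, begin = marks[i]
--         assert kind
--         assert i + 1 < len(marks)
--         kind2, end = marks[i + 1]
--         assert not kind2
--         result.append((begin, end, set(range(begin + 1, end))))
--         i += 2
--     return result
-- ===== Notes on version B (the rewrite author's own statement) =====
-- stated objective: simpler
-- what changed: B splits the single stateful scan (inQuote flag, running begin index, mutable accumulating set) into two phases: first collect the list of quote-mark events, then pair consecutive open/close events and emit each quotation span as set(range(begin+1,end)) in closed form instead of element-by-element accumulation.
import Mathlib
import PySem

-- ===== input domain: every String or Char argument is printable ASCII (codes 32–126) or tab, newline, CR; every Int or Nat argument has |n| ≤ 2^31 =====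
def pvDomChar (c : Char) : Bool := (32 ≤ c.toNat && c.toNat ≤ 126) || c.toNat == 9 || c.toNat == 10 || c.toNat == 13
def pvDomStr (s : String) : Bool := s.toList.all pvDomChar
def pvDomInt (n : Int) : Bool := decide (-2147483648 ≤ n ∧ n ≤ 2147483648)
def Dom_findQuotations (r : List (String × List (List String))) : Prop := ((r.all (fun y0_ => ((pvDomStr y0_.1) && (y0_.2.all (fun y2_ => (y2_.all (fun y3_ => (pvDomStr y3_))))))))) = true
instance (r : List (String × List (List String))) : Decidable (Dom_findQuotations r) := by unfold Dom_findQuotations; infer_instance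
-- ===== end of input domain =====

-- B replaces A's single stateful scan by two phases (collect quote-mark events, then pair
-- consecutive open/close marks and emit range(begin+1,end)); objective: simpler decomposition.

-- ===== PORT A =====
-- A's for-loop as structural recursion over the word list, carrying A's exact state
-- (index, inQuote, begin, quotationList, quotationSet)
def loopA : List (List String) → Int → Bool → Int → List (Int × Int × List Int) → PySem.Set Int → List (Int × Int × List Int)
  | [], _, _, _, ql, _ => ql
  | w :: ws, index, inQuote, begin, ql, qs =>
    let index := index + 1
    if (PySem.List.pyGet? w 0).getD "" = "``" then
      loopA ws index true index ql qs
    else if (PySem.List.pyGet? w 0).getD "" = "''" then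
      loopA ws index false begin (ql ++ [(begin, index, qs)]) PySem.Set.empty
    else if inQuote then
      loopA ws index inQuote begin ql (PySem.Set.add qs index)
    else
      loopA ws index inQuote begin ql qs

def findQuotations (r : List (String × List (List String))) : List (Int × Int × List Int) :=
  loopA ((List.lookup "words" r).getD []) 0 false 0 [] PySem.Set.empty

-- ===== PORT B =====
-- phase 1: collect the quote-mark events (kind, index), kind true = open
def marksB : List (List String) → Int → List (Bool × Int)
  | [], _ => []
  | w :: ws, index =>
    let w0 := (PySem.List.pyGet? w 0).getD ""
    if w0 = "``" then (true, index) :: marksB ws (index + 1)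
    else if w0 = "''" then (false, index) :: marksB ws (index + 1)
    else marksB ws (index + 1)

-- phase 2: pair consecutive marks
def pairB : List (Bool × Int) → List (Int × Int × List Int)
  | (_, b) :: (_, e) :: rest => (b, e, PySem.Set.ofList (PySem.List.pyRange (b + 1) e 1)) :: pairB rest
  | _ => []

def findQuotations_alt (r : List (String × List (List String))) : List (Int × Int × List Int) :=
  pairB (marksB ((List.lookup "words" r).getD []) 1)

-- ===== PRECONDITION & SPEC =====
-- the sequence of quote kinds among the words (true = `` , false = '')
def kindsOf (words : List (List String)) : List Bool :=
  words.filterMap (fun w =>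
    if (PySem.List.pyGet? w 0).getD "" = "``" then some true
    else if (PySem.List.pyGet? w 0).getD "" = "''" then some false else none)

-- well-formed quotations: opens and closes strictly alternate, starting open, ending close
def altOK : List Bool → Bool
  | [] => true
  | true :: false :: rest => altOK rest
  | _ => false

-- Pre_ excludes exactly the inputs where Python A raises: a missing 'words' key (KeyError),
-- an empty word (IndexError on word[0]), or unbalanced/misordered quote marks (AssertionError).
def Pre_findQuotations (r : List (String × List (List String))) : Prop :=
  (List.lookup "words" r).isSome ∧
  (∀ w ∈ (List.lookup "words" r).getD [], w ≠ []) ∧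
  altOK (kindsOf ((List.lookup "words" r).getD [])) = true

instance (r : List (String × List (List String))) : Decidable (Pre_findQuotations r) := by
  unfold Pre_findQuotations; infer_instance

def pvWitness_findQuotations : (List (String × List (List String))) :=
  [("words", [["He"], ["said"], ["``"], ["hi"], ["there"], ["''"], ["today"]])]

def Spec_findQuotations (r : List (String × List (List String))) (out : List (Int × Int × List Int)) : Prop := out = findQuotations_alt r
instance (r : List (String × List (List String))) (out : List (Int × Int × List Int)) : Decidable (Spec_findQuotations r out) := by unfold Spec_findQuotations; infer_instance

-- ===== CLAIM (what is proved, stated in full; the proofs are below) =====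
def Claim_equal_findQuotations : Prop := ∀ (r : List (String × List (List String))), Dom_findQuotations r → Pre_findQuotations r → Spec_findQuotations r (findQuotations r)

-- ===== LEMMAS AND PROOFS =====

-- the head test, stated once for all three branch analyses
theorem kindsOf_cons (w : List String) (ws : List (List String)) :
    kindsOf (w :: ws) =
      (if (PySem.List.pyGet? w 0).getD "" = "``" then true :: kindsOf ws
       else if (PySem.List.pyGet? w 0).getD "" = "''" then false :: kindsOf ws
       else kindsOf ws) := by
  simp only [kindsOf, List.filterMap_cons]
  split_ifs <;> rfl

-- A's accumulating set, extended by the next inner index, stays a contiguous range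
theorem set_add_range (b i : Int) (h : b ≤ i) :
    PySem.Set.add (PySem.List.pyRange (b + 1) (i + 1) 1) (i + 1) = PySem.List.pyRange (b + 1) (i + 1 + 1) 1 := by
  rw [PySem.List.pyRange_one_succ_right (by omega : b + 1 ≤ i + 1)]
  have hmem : (i + 1) ∉ PySem.List.pyRange (b + 1) (i + 1) 1 := by
    simp [PySem.List.mem_pyRange_one]
  simp [PySem.Set.add, PySem.Set.contains, hmem]

-- main invariant, both loop states at once:
-- · inQuote = false, empty set: the loop appends exactly pairB of the remaining marks;
-- · inQuote = true, set = range(b+1, idx+1): the open at b pairs with the coming close.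
theorem loopA_spec (ws : List (List String)) :
    (∀ (idx b : Int) (ql : List (Int × Int × List Int)),
      altOK (kindsOf ws) = true →
      loopA ws idx false b ql PySem.Set.empty = ql ++ pairB (marksB ws (idx + 1))) ∧
    (∀ (idx b : Int) (ql : List (Int × Int × List Int)),
      b ≤ idx →
      (match kindsOf ws with | false :: rest => altOK rest | _ => false) = true →
      loopA ws idx true b ql (PySem.List.pyRange (b + 1) (idx + 1) 1)
        = ql ++ pairB ((true, b) :: marksB ws (idx + 1))) := by
  induction ws with
  | nil =>
    refine ⟨fun idx b ql _ => by simp [loopA, marksB, pairB], fun idx b ql _ h => ?_⟩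
    simp [kindsOf] at h
  | cons w ws ih =>
    constructor
    · intro idx b ql hAlt
      rw [kindsOf_cons] at hAlt
      by_cases hO : (PySem.List.pyGet? w 0).getD "" = "``"
      · -- open mark: switch to the inQuote invariant with begin = idx+1, empty range
        rw [if_pos hO] at hAlt
        have hpre : (match kindsOf ws with | false :: rest => altOK rest | _ => false) = true := by
          rcases hk : kindsOf ws with _ | ⟨_ | _, rest⟩ <;> rw [hk] at hAlt <;>
            simp_all [altOK]
        have h2 := ih.2 (idx + 1) (idx + 1) ql (le_refl _) hpre
        rw [PySem.List.pyRange_one_eq_nil (by omega)] at h2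
        simp only [loopA, if_pos hO]
        exact h2.trans (by simp [marksB, hO])
      · by_cases hC : (PySem.List.pyGet? w 0).getD "" = "''"
        · -- close first: contradicts altOK
          rw [if_neg hO, if_pos hC] at hAlt; simp [altOK] at hAlt
        · -- plain word outside quotes
          rw [if_neg hO, if_neg hC] at hAlt
          simp only [loopA, if_neg hO, if_neg hC, if_neg Bool.false_ne_true]
          rw [ih.1 (idx + 1) b ql hAlt]
          simp [marksB, hO, hC]
    · intro idx b ql hb hpre
      rw [kindsOf_cons] at hpre
      by_cases hO : (PySem.List.pyGet? w 0).getD "" = "``"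
      · -- double open: contradicts the invariant
        rw [if_pos hO] at hpre; simp at hpre
      · by_cases hC : (PySem.List.pyGet? w 0).getD "" = "''"
        · -- closing mark at index idx+1: emit the pair, return to the base invariant
          rw [if_neg hO, if_pos hC] at hpre
          simp only at hpre
          simp only [loopA, if_neg hO, if_pos hC]
          rw [ih.1 (idx + 1) b (ql ++ [(b, idx + 1, PySem.List.pyRange (b + 1) (idx + 1) 1)]) hpre]
          have hself : PySem.Set.ofList (PySem.List.pyRange (b + 1) (idx + 1) 1)
              = PySem.List.pyRange (b + 1) (idx + 1) 1 :=
            PySem.Set.ofList_eq_self_of_nodup _ (PySem.List.nodup_pyRange_one _ _)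
          simp [marksB, hC, pairB, hself]
        · -- plain word inside the quotation: add idx+1 to the range
          rw [if_neg hO, if_neg hC] at hpre
          simp only [loopA, if_neg hO, if_neg hC]
          rw [set_add_range b idx hb]
          rw [ih.2 (idx + 1) b ql (by omega) hpre]
          simp [marksB, hO, hC]

-- ===== VERDICT (by name: the statement is the Claim_ definition above) =====
theorem findQuotations_spec : Claim_equal_findQuotations := by
  intro r _ hPre
  obtain ⟨-, -, hAlt⟩ := hPre
  unfold Spec_findQuotations findQuotations findQuotations_alt
  have h := (loopA_spec ((List.lookup "words" r).getD [])).1 0 0 [] hAlt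
  simpa using h
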